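-- pv_equiv track=rewrite | github.com/jasonknight/coding-problems | coding_problem_09.py | sum_non_adj
-- ===== SOURCE A (Python) =====
-- def sum_non_adj(inp):
--     l = 0
--     s1 = 0
--     s2 = 0
--     for i in range(len(inp)):
--         if l == inp[i]:
--             continue
--         s1 += inp[i]
--         tmp = s1
--         s1 = s2
--         s2 = tmp
--         l = inp[i]
--     return max(s1,s2)
-- ===== SOURCE B (Python) =====
-- def sum_non_adj(inp):
--     filtered = []
--     last = 0
--     for x in inp:
--         if x != last:
--             filtered.append(x)
--             last = x
--     return max(sum(filtered[::2]), sum(filtered[1::2]))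
-- ===== Notes on version B (the rewrite author's own statement) =====
-- stated objective: simpler
-- what changed: Replaces A's s1/s2-swap accumulator with a two-phase decomposition: first build the filtered list (each element kept only if it differs from the last kept value, sentinel 0), then return the max of the sums of its even-indexed and odd-indexed slices.
import Mathlib
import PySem

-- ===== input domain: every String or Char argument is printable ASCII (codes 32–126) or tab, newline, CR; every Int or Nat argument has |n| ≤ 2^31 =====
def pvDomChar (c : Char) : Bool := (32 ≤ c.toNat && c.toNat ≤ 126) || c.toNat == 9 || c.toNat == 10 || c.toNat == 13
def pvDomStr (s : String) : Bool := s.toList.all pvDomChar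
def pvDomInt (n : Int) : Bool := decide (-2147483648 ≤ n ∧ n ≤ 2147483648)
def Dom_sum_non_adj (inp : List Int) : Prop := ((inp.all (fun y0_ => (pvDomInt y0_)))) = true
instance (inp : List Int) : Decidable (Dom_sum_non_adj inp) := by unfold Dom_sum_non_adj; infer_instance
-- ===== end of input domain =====

-- B replaces A's swap-accumulator loop with a simpler decomposition: filter (vs last kept, sentinel 0), then max of even/odd-index slice sums.

-- ===== PORT A =====
-- A iterates i over range(len(inp)) reading inp[i]; ported as a left fold over the
-- list elements in order (same values, same state (l, s1, s2), same branch order).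
def sum_non_adj (inp : List Int) : Int :=
  let st := inp.foldl (fun (s : Int × Int × Int) x =>
      if s.1 = x then s else (x, s.2.2, s.2.1 + x)) (0, 0, 0)
  max st.2.1 st.2.2

-- ===== PORT B =====
-- Source B's filtered-list building loop, as structural recursion over the same elements.
def pvFilt (last : Int) : List Int → List Int
  | [] => []
  | x :: xs => if x ≠ last then x :: pvFilt x xs else pvFilt last xs

-- exact port of the stride-2 slice lst[::2] (start 0, step 2) for a plain list
def pvStride2 : List Int → List Int
  | [] => []
  | [x] => [x]
  | x :: _ :: xs => x :: pvStride2 xs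

def sum_non_adj_alt (inp : List Int) : Int :=
  let filtered := pvFilt 0 inp
  max (pvStride2 filtered).sum (pvStride2 (filtered.drop 1)).sum  -- filtered[1::2] = stride-2 of drop 1

-- ===== PRECONDITION & SPEC =====
def Spec_sum_non_adj (inp : List Int) (out : Int) : Prop := out = sum_non_adj_alt inp
instance (inp : List Int) (out : Int) : Decidable (Spec_sum_non_adj inp out) := by unfold Spec_sum_non_adj; infer_instance

-- ===== CLAIM (what is proved, stated in full; the proofs are below) =====
def Claim_equal_sum_non_adj : Prop := ∀ (inp : List Int), Dom_sum_non_adj inp → Spec_sum_non_adj inp (sum_non_adj inp)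

-- ===== LEMMAS AND PROOFS =====
lemma pvStride2_cons (x : Int) (xs : List Int) :
    pvStride2 (x :: xs) = x :: pvStride2 (xs.drop 1) := by
  cases xs <;> simp [pvStride2]

lemma sum_non_adj_loop_eq (xs : List Int) : ∀ (l s1 s2 : Int),
    (let st := xs.foldl (fun (s : Int × Int × Int) x =>
        if s.1 = x then s else (x, s.2.2, s.2.1 + x)) (l, s1, s2)
     max st.2.1 st.2.2)
    = max (s1 + (pvStride2 (pvFilt l xs)).sum)
          (s2 + (pvStride2 ((pvFilt l xs).drop 1)).sum) := by
  induction xs with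
  | nil => intro l s1 s2; simp [pvFilt, pvStride2]
  | cons x xs ih =>
    intro l s1 s2
    by_cases h : l = x
    · simp only [List.foldl_cons, pvFilt, h]
      simpa using ih x s1 s2
    · simp only [List.foldl_cons, if_neg h, pvFilt,
                 if_pos (show x ≠ l from fun e => h e.symm)]
      rw [ih x s2 (s1 + x), pvStride2_cons]
      simp only [List.sum_cons, List.drop_one, List.tail_cons]
      omega

theorem sum_non_adj_spec : Claim_equal_sum_non_adj := by
  intro inp _
  unfold Spec_sum_non_adj sum_non_adj sum_non_adj_alt
  simpa using sum_non_adj_loop_eq inp 0 0 0
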